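-- pv_equiv track=rewrite | github.com/wjakewright/Activity_Viewer | Activity_Viewer/signal_extraction.py | find_bout_separations
-- ===== SOURCE A (Python) =====
-- def find_bout_separations(images, frame_counts):
--     """Function to find the frames seperating seperate imaging bouts within
--         the same imaging session
--
--         Returns a list of containing the index of the first frame at the
--         start of a new bout"""
--
--     previous_frames = 0
--     bout_ids = []
--     bout_separations = []
--     for i, (image, count) in enumerate(zip(images, frame_counts)):
--         bout = image.split("_")[-3]
--         bout_ids.append(bout)
--         start_frame = previous_frames
--         if i > 0:
--             if bout != bout_ids[i - 1]:
--                 bout_separations.append(start_frame)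
--         else:
--             bout_separations.append(start_frame)
--         previous_frames = previous_frames + count
--
--     return bout_separations
-- ===== SOURCE B (Python) =====
-- def find_bout_separations(images, frame_counts):
--     """Recursive run-length segmentation: each recursive step consumes one
--     whole maximal run of pairs sharing a bout id (summing its frame counts)
--     and emits that run's starting frame index."""
--
--     def run(key, pairs):
--         # consume the leading pairs whose bout id equals key, summing counts
--         total = 0
--         while pairs and pairs[0][0].split("_")[-3] == key:
--             total += pairs[0][1]
--             pairs = pairs[1:]
--         return total, pairs
--
--     def go(start, pairs):
--         if not pairs:
--             return []
--         (img, count), rest = pairs[0], pairs[1:]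
--         total, rest = run(img.split("_")[-3], rest)
--         return [start] + go(start + count + total, rest)
--
--     return go(0, list(zip(images, frame_counts)))
-- ===== Notes on version B (the rewrite author's own statement) =====
-- stated objective: alternative
-- what changed: Replaces A's fused per-element loop (running total, bout-id history list, compare-with-previous via enumerate index) with recursive run-length segmentation: a helper consumes each maximal run of equal bout ids while summing its counts, and an outer recursion emits exactly one starting frame per run.
import Mathlib
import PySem

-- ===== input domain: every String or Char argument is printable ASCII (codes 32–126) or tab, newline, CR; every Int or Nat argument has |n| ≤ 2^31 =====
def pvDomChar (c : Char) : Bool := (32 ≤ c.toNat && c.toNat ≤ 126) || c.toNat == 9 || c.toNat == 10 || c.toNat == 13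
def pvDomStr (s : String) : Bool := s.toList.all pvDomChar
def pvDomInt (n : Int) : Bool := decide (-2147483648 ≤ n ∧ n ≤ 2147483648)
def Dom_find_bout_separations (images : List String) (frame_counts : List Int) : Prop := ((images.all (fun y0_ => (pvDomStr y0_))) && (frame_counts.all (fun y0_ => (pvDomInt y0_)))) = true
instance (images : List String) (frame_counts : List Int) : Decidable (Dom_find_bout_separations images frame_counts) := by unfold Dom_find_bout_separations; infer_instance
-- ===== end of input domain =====

-- B replaces A's fused compare-with-previous loop by recursive run-length segmentation (alternative decomposition, same cost).

-- ===== PORT A =====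
-- image.split("_")[-3]; the "" default is only reached outside Pre_ (Python raises IndexError there).
def pvBout (img : String) : String :=
  (PySem.List.pyGet? ((PySem.Str.split? img "_").getD []) (-3)).getD ""

-- state = (previous_frames, bout_ids, bout_separations), loop over enumerate(zip(...))
def pvStepA (st : Int × List String × List Int) (p : Int × String × Int) :
    Int × List String × List Int :=
  let i := p.1
  let image := p.2.1
  let count := p.2.2
  let bout := pvBout image
  let bout_ids := st.2.1 ++ [bout]
  let start_frame := st.1
  let seps :=
    if i > 0 then
      (if bout ≠ (PySem.List.pyGet? bout_ids (i - 1)).getD "" then st.2.2 ++ [start_frame] else st.2.2)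
    else st.2.2 ++ [start_frame]
  (st.1 + count, bout_ids, seps)

def find_bout_separations (images : List String) (frame_counts : List Int) : List Int :=
  ((PySem.List.enumerate (images.zip frame_counts) 0).foldl pvStepA (0, [], [])).2.2

-- ===== PORT B =====
-- Source B's `run(key, pairs)`: consume the leading run of pairs with bout id = key, summing counts.
def pvRun (key : String) : List (String × Int) → Int × List (String × Int)
  | [] => (0, [])
  | p :: rest =>
      if pvBout p.1 = key then
        let r := pvRun key rest
        (p.2 + r.1, r.2)
      else (0, p :: rest)

-- termination fact the outer recursion cites
theorem pvRun_length_le (key : String) : ∀ ps : List (String × Int), (pvRun key ps).2.length ≤ ps.length := by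
  intro ps
  induction ps with
  | nil => simp [pvRun]
  | cons p rest ih =>
    simp only [pvRun]
    split
    · exact Nat.le_succ_of_le ih
    · simp

-- Source B's `go(start, pairs)`
def pvGo : Int → List (String × Int) → List Int
  | _, [] => []
  | start, p :: rest =>
      let tr := pvRun (pvBout p.1) rest
      start :: pvGo (start + p.2 + tr.1) tr.2
termination_by _ ps => ps.length
decreasing_by
  exact Nat.lt_succ_of_le (pvRun_length_le _ rest)

def find_bout_separations_alt (images : List String) (frame_counts : List Int) : List Int :=
  pvGo 0 (images.zip frame_counts)

-- ===== PRECONDITION & SPEC =====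
-- Pre_ excludes exactly the inputs where Python A raises IndexError: a zipped image whose
-- '_'-split has fewer than 3 parts (image.split("_")[-3] is out of range). B raises there too.
def Pre_find_bout_separations (images : List String) (frame_counts : List Int) : Prop :=
  ∀ p ∈ images.zip frame_counts, 3 ≤ ((PySem.Str.split? p.1 "_").getD []).length

instance (images : List String) (frame_counts : List Int) : Decidable (Pre_find_bout_separations images frame_counts) := by unfold Pre_find_bout_separations; infer_instance

def pvWitness_find_bout_separations : List String × List Int :=
  (["x_1_a_0", "x_1_b_0", "x_2_a_0"], [2, 3, 4])

def Spec_find_bout_separations (images : List String) (frame_counts : List Int) (out : List Int) : Prop := out = find_bout_separations_alt images frame_counts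
instance (images : List String) (frame_counts : List Int) (out : List Int) : Decidable (Spec_find_bout_separations images frame_counts out) := by unfold Spec_find_bout_separations; infer_instance

-- ===== CLAIM (what is proved, stated in full; the proofs are below) =====
def Claim_equal_find_bout_separations : Prop := ∀ (images : List String) (frame_counts : List Int), Dom_find_bout_separations images frame_counts → Pre_find_bout_separations images frame_counts → Spec_find_bout_separations images frame_counts (find_bout_separations images frame_counts)

-- ===== LEMMAS AND PROOFS =====

-- Middle form of A's loop: emit the offset when the bout id differs from the previous one `pb`.
def pvCore (prev : Int) (pb : Option String) : List (String × Int) → List Int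
  | [] => []
  | (img, c) :: rest =>
      (if some (pvBout img) = pb then [] else [prev]) ++ pvCore (prev + c) (some (pvBout img)) rest

theorem pvA_loop (ps : List (String × Int)) :
    ∀ (prev : Int) (ids : List String) (seps : List Int),
      ((PySem.List.enumerate ps (ids.length : Int)).foldl pvStepA (prev, ids, seps)).2.2
        = seps ++ pvCore prev ids.getLast? ps := by
  induction ps with
  | nil => intro prev ids seps; simp [PySem.List.enumerate_nil, pvCore]
  | cons p rest ih =>
    intro prev ids seps
    obtain ⟨img, c⟩ := p
    rw [PySem.List.enumerate_cons, List.foldl_cons]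
    have hstep : pvStepA (prev, ids, seps) ((ids.length : Int), img, c)
        = (prev + c, ids ++ [pvBout img],
            seps ++ (if some (pvBout img) = ids.getLast? then [] else [prev])) := by
      cases ids with
      | nil => simp [pvStepA]
      | cons a as =>
        simp only [pvStepA]
        have hpos : ((a :: as).length : Int) > 0 := by simp
        have hget : (PySem.List.pyGet? ((a :: as) ++ [pvBout img]) (((a :: as).length : Int) - 1)).getD ""
            = (a :: as).getLast (by simp) := by
          have : (((a :: as).length : Int) - 1) = (((a :: as).length - 1 : Nat) : Int) := by
            simp
          rw [this, PySem.List.pyGet?_natCast]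
          rw [List.getElem?_append_left (by simp)]
          rw [List.getElem?_eq_getElem (by simp)]
          simp [List.getLast_eq_getElem]
        simp only [if_pos hpos, hget]
        have hlast : (a :: as).getLast? = some ((a :: as).getLast (by simp)) := by
          simp [List.getLast?_eq_some_getLast]
        rw [hlast]
        by_cases h : pvBout img = (a :: as).getLast (by simp)
        · simp [h]
        · simp [h]
    rw [hstep]
    have hlen : ((ids.length : Int) + 1) = (((ids ++ [pvBout img]).length : Nat) : Int) := by
      simp
    rw [hlen, ih (prev + c) (ids ++ [pvBout img])]
    simp [pvCore, List.getLast?_append]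

-- pvCore over a run whose bout ids all equal `key` just accumulates the run's counts.
theorem pvCore_run (key : String) : ∀ (ps : List (String × Int)) (start : Int),
    pvCore start (some key) ps
      = pvCore (start + (pvRun key ps).1) (some key) (pvRun key ps).2 := by
  intro ps
  induction ps with
  | nil => intro start; simp [pvRun]
  | cons p rest ih =>
    intro start
    obtain ⟨img, c⟩ := p
    by_cases h : pvBout img = key
    · have hr : pvRun key ((img, c) :: rest) = (c + (pvRun key rest).1, (pvRun key rest).2) := by
        simp [pvRun, h]
      rw [hr]
      simp only [pvCore, h]
      rw [if_pos trivial]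
      simp only [List.nil_append]
      rw [ih (start + c)]
      ring_nf
    · simp [pvRun, h, pvCore]

-- After the run, the head of the remainder (if any) has a different bout id.
theorem pvRun_rest (key : String) : ∀ (ps : List (String × Int)) (p : String × Int) (rest : List (String × Int)),
    (pvRun key ps).2 = p :: rest → pvBout p.1 ≠ key := by
  intro ps
  induction ps with
  | nil => intro p rest h; simp [pvRun] at h
  | cons q qs ih =>
    intro p rest h
    by_cases hq : pvBout q.1 = key
    · have hr : pvRun key (q :: qs) = (q.2 + (pvRun key qs).1, (pvRun key qs).2) := by
        simp [pvRun, hq]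
      rw [hr] at h
      exact ih p rest h
    · have hr : pvRun key (q :: qs) = (0, q :: qs) := by
        simp [pvRun, hq]
      rw [hr] at h
      injection h with h1 h2
      rw [← h1]
      exact hq

-- B's recursion computes the same middle form.
theorem pvGo_eq (start : Int) (ps : List (String × Int)) : ∀ (pb : Option String),
    (∀ p rest, ps = p :: rest → pb ≠ some (pvBout p.1)) →
    pvGo start ps = pvCore start pb ps := by
  induction start, ps using pvGo.induct with
  | case1 _ => intro pb _; simp [pvGo, pvCore]
  | case2 start p rest tr ih =>
    intro pb hpb
    obtain ⟨img, c⟩ := p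
    simp only [pvGo, pvCore]
    rw [if_neg (fun h => hpb _ _ rfl h.symm)]
    rw [pvCore_run (pvBout img) rest (start + c)]
    simp only [List.singleton_append, List.cons.injEq, true_and]
    exact ih (some (pvBout img))
      (fun q qrest hq hcontra =>
        pvRun_rest (pvBout img) rest q qrest hq (Option.some.inj hcontra).symm)

-- ===== VERDICT (by name: the statement is the Claim_ definition above) =====
theorem find_bout_separations_spec : Claim_equal_find_bout_separations := by
  intro images frame_counts _ _
  unfold Spec_find_bout_separations find_bout_separations find_bout_separations_alt
  have hA : ((PySem.List.enumerate (images.zip frame_counts) 0).foldl pvStepA (0, [], [])).2.2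
      = pvCore 0 none (images.zip frame_counts) := by
    simpa using pvA_loop (images.zip frame_counts) 0 [] []
  rw [hA, pvGo_eq 0 (images.zip frame_counts) none (fun p rest _ h => by simp at h)]
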